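-- pv_equiv track=rewrite | github.com/NahishuHailar/LexicomTest | Tasks/tasks1/test.py | get_printed_data
-- ===== SOURCE A (Python) =====
-- def get_optimize_format_data(technic):
--     optimize_data = {}
--     for client in technic:
--         key = (client[2], client[3])
--         if key in optimize_data:
--             optimize_data[key].append((client[0], client[1]))
--         else:
--             optimize_data[key] = [(client[0], client[1])]
--     return optimize_data
--
-- def devices_list_to_str(devices_list):
--     result_list = ''
--     for device in devices_list:
--         result_list += device[0] + ' - ' + str(device[1]) + '; '
--     return result_list[:-2]
--
-- def get_printed_data(data):
--     data = get_optimize_format_data(data)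
--     printed_data = ''
--     for key in data:
--         client = key[0] + ' ' + str(key[1]) + ': '
--         devices = devices_list_to_str(data[key])
--         printed_data += client + devices + '\n'
--     return printed_data[:-1]
-- ===== SOURCE B (Python) =====
-- def get_printed_data(data):
--     groups = {}
--     for client in data:
--         key = (client[2], client[3])
--         part = client[0] + ' - ' + str(client[1])
--         if key in groups:
--             groups[key] += '; ' + part
--         else:
--             groups[key] = client[2] + ' ' + str(client[3]) + ': ' + part
--     return '\n'.join(groups.values())
-- ===== Notes on version B (the rewrite author's own statement) =====
-- stated objective: simpler
-- what changed: Replaces A's two-pass group-then-format (dict of tuple lists, helper formatting each list, then a second loop over the dict) with a single pass that accumulates the formatted line string per key directly and joins the values with newline, eliminating both helpers and the intermediate list-of-tuples representation.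
import Mathlib
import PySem

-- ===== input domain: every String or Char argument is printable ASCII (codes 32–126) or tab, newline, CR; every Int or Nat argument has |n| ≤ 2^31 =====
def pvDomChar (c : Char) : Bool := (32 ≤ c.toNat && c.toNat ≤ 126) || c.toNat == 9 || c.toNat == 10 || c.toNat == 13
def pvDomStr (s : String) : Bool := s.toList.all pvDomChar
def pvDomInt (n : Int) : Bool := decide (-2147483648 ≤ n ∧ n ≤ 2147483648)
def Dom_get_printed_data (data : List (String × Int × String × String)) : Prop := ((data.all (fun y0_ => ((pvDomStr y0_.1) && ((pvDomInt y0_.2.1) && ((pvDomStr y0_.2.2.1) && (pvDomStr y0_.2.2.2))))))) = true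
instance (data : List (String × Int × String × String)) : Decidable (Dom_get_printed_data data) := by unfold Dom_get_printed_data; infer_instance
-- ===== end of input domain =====

-- B replaces A's two-pass group-then-format (dict of tuple lists + two formatting helpers)
-- with one pass that accumulates the formatted line per key and joins the values (simpler; no speed claim).

-- ===== PORT A =====
def get_optimize_format_data (technic : List (String × Int × String × String)) :
    PySem.Dict (String × String) (List (String × Int)) :=
  technic.foldl (fun optimize_data client =>
    let key := (client.2.2.1, client.2.2.2)
    if optimize_data.contains key then
      optimize_data.modify key [] (fun l => l ++ [(client.1, client.2.1)])
    else
      optimize_data.insert key [(client.1, client.2.1)]) PySem.Dict.empty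

def devices_list_to_str (devices_list : List (String × Int)) : List Char :=
  let result_list := devices_list.foldl
    (fun acc device => acc ++ (device.1.toList ++ [' ', '-', ' '] ++ PySem.Int.toChars device.2 ++ [';', ' '])) []
  PySem.Chars.slice result_list none (some (-2))

def get_printed_data (data : List (String × Int × String × String)) : String :=
  let d := get_optimize_format_data data
  let printed_data := d.keys.foldl (fun acc key =>
    let client := key.1.toList ++ [' '] ++ key.2.toList ++ [':', ' ']
    let devices := devices_list_to_str (d.getD key [])
    acc ++ (client ++ devices ++ ['\n'])) []
  String.ofList (PySem.Chars.slice printed_data none (some (-1)))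

-- ===== PORT B =====
def get_printed_data_alt (data : List (String × Int × String × String)) : String :=
  let groups : PySem.Dict (String × String) (List Char) :=
    data.foldl (fun g client =>
      let key := (client.2.2.1, client.2.2.2)
      let part := client.1.toList ++ [' ', '-', ' '] ++ PySem.Int.toChars client.2.1
      if g.contains key then
        g.modify key [] (fun s => s ++ ([';', ' '] ++ part))
      else
        g.insert key (client.2.2.1.toList ++ [' '] ++ client.2.2.2.toList ++ [':', ' '] ++ part))
      PySem.Dict.empty
  String.ofList (PySem.Chars.join ['\n'] groups.values)

-- ===== PRECONDITION & SPEC =====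
def Spec_get_printed_data (data : List (String × Int × String × String)) (out : String) : Prop := out = get_printed_data_alt data
instance (data : List (String × Int × String × String)) (out : String) : Decidable (Spec_get_printed_data data out) := by unfold Spec_get_printed_data; infer_instance

-- ===== CLAIM =====
def Claim_equal_get_printed_data : Prop := ∀ (data : List (String × Int × String × String)), Dom_get_printed_data data → Spec_get_printed_data data (get_printed_data data)

-- ===== LEMMAS AND PROOFS =====

-- the formatted entry for one device
def pvFmtDev (d : String × Int) : List Char := d.1.toList ++ [' ', '-', ' '] ++ PySem.Int.toChars d.2
-- the full formatted line for one key with its device list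
def pvLine (k : String × String) (v : List (String × Int)) : List Char :=
  k.1.toList ++ [' '] ++ k.2.toList ++ [':', ' '] ++ PySem.Chars.join [';', ' '] (v.map pvFmtDev)

lemma pv_flatMap_sep {α : Type} (sep : List Char) (f : α → List Char) :
    ∀ (ls : List α), ls ≠ [] →
      ls.flatMap (fun x => f x ++ sep) = PySem.Chars.join sep (ls.map f) ++ sep := by
  intro ls h
  induction ls with
  | nil => exact absurd rfl h
  | cons a t ih =>
    cases t with
    | nil => simp [PySem.Chars.join_singleton]
    | cons b t' =>
      have ihh := ih (by simp)
      simp [PySem.Chars.join_cons_cons, ihh, List.append_assoc]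

lemma pv_join_append (sep : List Char) (ls : List (List Char)) (a : List Char) (h : ls ≠ []) :
    PySem.Chars.join sep (ls ++ [a]) = PySem.Chars.join sep ls ++ sep ++ a := by
  induction ls with
  | nil => exact absurd rfl h
  | cons b t ih =>
    cases t with
    | nil => simp [PySem.Chars.join_singleton, PySem.Chars.join_cons_cons]
    | cons c t' =>
      have ihh := ih (by simp)
      simp only [List.cons_append] at ihh ⊢
      rw [PySem.Chars.join_cons_cons, PySem.Chars.join_cons_cons, ihh]
      simp [List.append_assoc]

lemma pvLine_append (k : String × String) (v : List (String × Int)) (x : String × Int) (h : v ≠ []) :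
    pvLine k (v ++ [x]) = pvLine k v ++ ([';', ' '] ++ pvFmtDev x) := by
  unfold pvLine
  rw [List.map_append, List.map_singleton, pv_join_append _ _ _ (by simpa using h)]
  simp [List.append_assoc]

lemma pv_dls (v : List (String × Int)) (h : v ≠ []) :
    devices_list_to_str v = PySem.Chars.join [';', ' '] (v.map pvFmtDev) := by
  unfold devices_list_to_str
  dsimp only
  rw [PySem.List.foldl_append_eq_flatMap]
  have : v.flatMap (fun device => device.1.toList ++ [' ', '-', ' '] ++ PySem.Int.toChars device.2 ++ [';', ' '])
      = v.flatMap (fun device => pvFmtDev device ++ [';', ' ']) := by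
    simp [pvFmtDev, List.append_assoc]
  rw [List.nil_append, this, pv_flatMap_sep _ _ _ h, PySem.Chars.slice_eq_listSlice,
      PySem.List.slice_to_neg_ofNat _ 2 (by omega)]
  simp

lemma pv_flatMap_sep' (sep : List Char) (ls : List (List Char)) (h : ls ≠ []) :
    ls.flatMap (fun x => x ++ sep) = PySem.Chars.join sep ls ++ sep := by
  simpa using pv_flatMap_sep sep id ls h

-- the loop invariant: B's dict holds exactly the formatted line of A's dict, key for key
lemma pv_inv (data : List (String × Int × String × String))
    (dA : PySem.Dict (String × String) (List (String × Int)))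
    (gB : PySem.Dict (String × String) (List Char))
    (hit : gB.items = dA.items.map (fun kv => (kv.1, pvLine kv.1 kv.2)))
    (hnd : dA.keys.Nodup)
    (hne : ∀ kv ∈ dA.items, kv.2 ≠ []) :
    (data.foldl (fun g client =>
      let key := (client.2.2.1, client.2.2.2)
      let part := client.1.toList ++ [' ', '-', ' '] ++ PySem.Int.toChars client.2.1
      if g.contains key then
        g.modify key [] (fun s => s ++ ([';', ' '] ++ part))
      else
        g.insert key (client.2.2.1.toList ++ [' '] ++ client.2.2.2.toList ++ [':', ' '] ++ part)) gB).items
      = ((data.foldl (fun optimize_data client =>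
          let key := (client.2.2.1, client.2.2.2)
          if optimize_data.contains key then
            optimize_data.modify key [] (fun l => l ++ [(client.1, client.2.1)])
          else
            optimize_data.insert key [(client.1, client.2.1)]) dA)).items.map (fun kv => (kv.1, pvLine kv.1 kv.2))
    ∧ ((data.foldl (fun optimize_data client =>
          let key := (client.2.2.1, client.2.2.2)
          if optimize_data.contains key then
            optimize_data.modify key [] (fun l => l ++ [(client.1, client.2.1)])
          else
            optimize_data.insert key [(client.1, client.2.1)]) dA)).keys.Nodup
    ∧ ∀ kv ∈ ((data.foldl (fun optimize_data client =>
          let key := (client.2.2.1, client.2.2.2)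
          if optimize_data.contains key then
            optimize_data.modify key [] (fun l => l ++ [(client.1, client.2.1)])
          else
            optimize_data.insert key [(client.1, client.2.1)]) dA)).items, kv.2 ≠ [] := by
  induction data generalizing dA gB with
  | nil => exact ⟨hit, hnd, hne⟩
  | cons c t ih =>
    simp only [List.foldl_cons]
    have hkeys : gB.keys = dA.keys := by
      simp only [PySem.Dict.keys, hit, List.map_map]; rfl
    have hcont : ∀ q, gB.contains q = dA.contains q := by
      intro q
      rw [PySem.Dict.contains_eq_decide_mem_keys, PySem.Dict.contains_eq_decide_mem_keys, hkeys]
    have hndB : gB.keys.Nodup := by rw [hkeys]; exact hnd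
    have hmodA : ∀ (d : PySem.Dict (String × String) (List (String × Int))) q d0 f,
        d.modify q d0 f = d.insert q (f (d.getD q d0)) := fun _ _ _ _ => rfl
    have hmodB : ∀ (d : PySem.Dict (String × String) (List Char)) q d0 f,
        d.modify q d0 f = d.insert q (f (d.getD q d0)) := fun _ _ _ _ => rfl
    by_cases hc : dA.contains (c.2.2.1, c.2.2.2) = true
    · have hcB : gB.contains (c.2.2.1, c.2.2.2) = true := by rw [hcont]; exact hc
      rw [if_pos hc, if_pos hcB, hmodA, hmodB]
      refine ih _ _ ?_ ?_ ?_
      · rw [PySem.Dict.items_insert_of_contains _ _ hcB,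
            PySem.Dict.items_insert_of_contains _ _ hc, hit, List.map_map, List.map_map]
        refine List.map_congr_left ?_
        intro p hp
        simp only [Function.comp]
        by_cases hpk : p.1 = (c.2.2.1, c.2.2.2)
        · have hvA : dA.getD (c.2.2.1, c.2.2.2) [] = p.2 := by
            refine PySem.Dict.getD_of_mem_items _ ?_ hnd []
            rw [← hpk]; simpa using hp
          have hvB : gB.getD (c.2.2.1, c.2.2.2) [] = pvLine p.1 p.2 := by
            refine PySem.Dict.getD_of_mem_items _ ?_ hndB []
            rw [hit]
            refine List.mem_map.mpr ⟨p, hp, ?_⟩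
            rw [hpk]
          simp only [hpk, beq_self_eq_true, if_true, hvA, hvB]
          rw [pvLine_append _ _ _ (hne p hp)]
          rfl
        · have : (p.1 == (c.2.2.1, c.2.2.2)) = false := by
            exact beq_eq_false_iff_ne.mpr hpk
          simp [this]
      · rw [PySem.Dict.keys_insert_of_contains _ _ hc]; exact hnd
      · intro q hq
        rw [PySem.Dict.mem_items_insert] at hq
        rcases hq with h1 | ⟨h2, _⟩
        · rw [h1]; simp
        · exact hne q h2
    · have hcB : ¬ gB.contains (c.2.2.1, c.2.2.2) = true := by rw [hcont]; exact hc
      have hc' : dA.contains (c.2.2.1, c.2.2.2) = false := by simpa using hc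
      have hcB' : gB.contains (c.2.2.1, c.2.2.2) = false := by simpa using hcB
      rw [if_neg hc, if_neg hcB]
      refine ih _ _ ?_ ?_ ?_
      · rw [PySem.Dict.items_insert_of_not_contains _ _ hcB',
            PySem.Dict.items_insert_of_not_contains _ _ hc', hit, List.map_append]
        simp [pvLine, pvFmtDev, PySem.Chars.join_singleton, List.append_assoc]
      · exact PySem.Dict.nodup_keys_insert _ _ _ hnd
      · intro q hq
        rw [PySem.Dict.mem_items_insert] at hq
        rcases hq with h1 | ⟨h2, _⟩
        · rw [h1]; simp
        · exact hne q h2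

lemma pv_main (data : List (String × Int × String × String)) :
    get_printed_data data = get_printed_data_alt data := by
  unfold get_printed_data get_printed_data_alt get_optimize_format_data
  dsimp only
  obtain ⟨hit, hnd, hne⟩ := pv_inv data PySem.Dict.empty PySem.Dict.empty rfl
    (by simp [PySem.Dict.keys_empty])
    (by intro kv h
        simp [show (PySem.Dict.empty : PySem.Dict (String × String) (List (String × Int))).items = []
                from rfl] at h)
  rw [PySem.List.foldl_append_eq_flatMap, List.nil_append]
  set dA := (List.foldl (fun optimize_data client =>
      let key := (client.2.2.1, client.2.2.2)
      if optimize_data.contains key = true then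
        optimize_data.modify key [] fun l => l ++ [(client.1, client.2.1)]
      else optimize_data.insert key [(client.1, client.2.1)]) PySem.Dict.empty data) with hdA
  set gB := (List.foldl (fun g client =>
      let key := (client.2.2.1, client.2.2.2)
      let part := client.1.toList ++ [' ', '-', ' '] ++ PySem.Int.toChars client.2.1
      if g.contains key = true then g.modify key [] fun s => s ++ ([';', ' '] ++ part)
      else g.insert key (client.2.2.1.toList ++ [' '] ++ client.2.2.2.toList ++ [':', ' '] ++ part))
      PySem.Dict.empty data) with hgB
  have hvals : gB.values = dA.items.map (fun kv => pvLine kv.1 kv.2) := by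
    show gB.items.map (·.2) = _
    rw [hit, List.map_map]
    rfl
  have hA : dA.keys.flatMap
      (fun key => key.1.toList ++ [' '] ++ key.2.toList ++ [':', ' ']
        ++ devices_list_to_str (dA.getD key []) ++ ['\n'])
      = (dA.items.map (fun kv => pvLine kv.1 kv.2)).flatMap (fun l => l ++ ['\n']) := by
    rw [show dA.keys = dA.items.map (·.1) from rfl, List.flatMap_map, List.flatMap_map]
    rw [List.flatMap_def, List.flatMap_def]
    refine congrArg List.flatten (List.map_congr_left ?_)
    intro kv hkv
    rw [PySem.Dict.getD_of_mem_items _ (by simpa using hkv) hnd, pv_dls _ (hne kv hkv)]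
    simp [pvLine, List.append_assoc]
  rw [hA, hvals]
  cases hi : dA.items.map (fun kv => pvLine kv.1 kv.2) with
  | nil => rfl
  | cons l ls =>
    rw [pv_flatMap_sep' ['\n'] (l :: ls) (by simp)]
    rw [PySem.Chars.slice_eq_listSlice, PySem.List.slice_to_neg_one, List.dropLast_concat]

-- ===== VERDICT =====
theorem get_printed_data_spec : Claim_equal_get_printed_data := by
  intro data _
  exact pv_main data
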